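-- pv_equiv track=rewrite | github.com/IgrMd/yandex-algos-training | Тренировки по алгоритмам 6.0/Лекция 3. Стеки, очереди, деки/J.py | chairs
-- ===== SOURCE A (Python) =====
-- class Queue:
--     def __init__(self, cap: int):
--         self.capacity = cap
--         self.size = self.l = self.r = 0
--         self.buf = [0] * cap
--
--     def front(self):
--         if not self.size:
--             raise RuntimeError("Empty")
--         return self.buf[self.l]
--
--     def back(self):
--         if not self.size:
--             raise RuntimeError("Empty")
--         return self.buf[self.r - 1]
--
--     def push_back(self, item):
--         if self.capacity == self.size:
--             raise RuntimeError("Full")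
--         self.buf[self.r] = item
--         self.r = (self.r + 1) % self.capacity
--         self.size += 1
--
--     def push_front(self, item):
--         if self.capacity == self.size:
--             raise RuntimeError("Full")
--         self.l = self.l - 1 if self.l else self.capacity - 1
--         self.buf[self.l] = item
--         self.size += 1
--
--     def pop_back(self):
--         if not self.size:
--             raise RuntimeError("Empty")
--         self.r = self.r - 1 if self.r else self.capacity - 1
--         self.size -= 1
--         return self.buf[self.r]
--
--     def pop_front(self):
--         if not self.size:
--             raise RuntimeError("Empty")
--         self.l = (self.l + 1) % self.capacity
--         self.size -= 1
--         return self.buf[self.l - 1]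
--
--     def __len__(self) -> int:
--         return self.size
--
--     def __repr__(self):
--         buf = []
--         l = self.l
--         for _ in range(self.size):
--             buf.append(self.buf[l])
--             l += 1
--             l %= self.capacity
--         return str(buf)
--
-- def chairs(n, H, heights: list[int], wides: list[int]):
--     chair_arr = []
--     for i in range(n):
--         chair_arr.append((heights[i], wides[i]))
--     chair_arr.sort()
--     diff_queue = Queue(n)
--     r = 0
--     sum_w = 0
--     ans = 10 ** 9
--     for l in range(n):
--         if r == n:
--             break
--         while r < n and sum_w < H:
--             sum_w += chair_arr[r][1]
--             r_diff = chair_arr[r][0] - chair_arr[r - 1][0] if r != l else 0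
--             while diff_queue and diff_queue.back() < r_diff:
--                 diff_queue.pop_back()
--             diff_queue.push_back(r_diff)
--             r += 1
--         if sum_w >= H and diff_queue:
--             ans = min(ans, diff_queue.front())
--         if l + 1 < n:
--             l_diff = chair_arr[l + 1][0] - chair_arr[l][0]
--             if diff_queue and l_diff == diff_queue.front():
--                 diff_queue.pop_front()
--         sum_w -= chair_arr[l][1]
--     return ans
-- ===== SOURCE B (Python) =====
-- def chairs(n, H, heights, wides):
--     chair_arr = []
--     for i in range(n):
--         chair_arr.append((heights[i], wides[i]))
--     chair_arr.sort()
--     vals = []          # log of every pushed height-gap, in order; never mutated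
--     p = 0              # gaps in vals[:p] have left the window-maximum structure
--     r = 0
--     sum_w = 0
--     ans = 10 ** 9
--     for l in range(n):
--         if r == n:
--             break
--         while r < n and sum_w < H:
--             sum_w += chair_arr[r][1]
--             vals.append(chair_arr[r][0] - chair_arr[r - 1][0] if r != l else 0)
--             r += 1
--         if sum_w >= H and p < r:
--             ans = min(ans, max(vals[p:r]))
--         if l + 1 < n and p < r and chair_arr[l + 1][0] - chair_arr[l][0] == max(vals[p:r]):
--             p = vals.index(max(vals[p:r]), p) + 1
--         sum_w -= chair_arr[l][1]
--     return ans
-- ===== Notes on version B (the rewrite author's own statement) =====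
-- stated objective: alternative
-- what changed: The custom ring-buffer monotonic deque (push_back/pop_back/pop_front with modular-index bookkeeping) is replaced by an append-only log of the pushed height-gaps plus a single front pointer p: the window maximum is read off directly as max(vals[p:r]) and a front-pop becomes an index() jump of p, so no queue data structure is maintained at all (at the cost of rescanning the slice per window).
import Mathlib
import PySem

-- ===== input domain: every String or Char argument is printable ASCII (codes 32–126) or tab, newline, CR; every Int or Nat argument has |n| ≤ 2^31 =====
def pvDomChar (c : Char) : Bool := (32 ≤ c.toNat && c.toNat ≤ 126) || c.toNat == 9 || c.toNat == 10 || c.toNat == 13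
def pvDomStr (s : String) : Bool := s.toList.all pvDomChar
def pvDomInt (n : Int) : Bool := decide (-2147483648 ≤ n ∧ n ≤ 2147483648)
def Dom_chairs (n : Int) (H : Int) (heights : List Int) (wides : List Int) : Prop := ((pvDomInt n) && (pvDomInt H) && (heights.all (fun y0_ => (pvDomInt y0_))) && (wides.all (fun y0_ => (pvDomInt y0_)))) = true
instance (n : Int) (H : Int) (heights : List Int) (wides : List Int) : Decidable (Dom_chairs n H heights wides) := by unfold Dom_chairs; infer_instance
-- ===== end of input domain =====

-- B replaces A's ring-buffer monotonic deque by an append-only gap log plus a front pointer,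
-- reading the window maximum directly off the slice (alternative structure, same results).

-- ===== PORT A =====
-- shared by both ports (both Pythons build and sort chair_arr with the same two lines):
-- chair_arr = [(heights[i], wides[i]) for i in range(n)]; chair_arr.sort()
def mkChairs (n : Int) (heights wides : List Int) : List (Int × Int) :=
  PySem.List.sorted2
    ((PySem.List.pyRange 0 n 1).foldl
      (fun acc i => acc ++ [(PySem.List.pyGetD heights i 0, PySem.List.pyGetD wides i 0)]) [])
    Prod.fst Prod.snd

-- the Queue class: ring buffer with capacity, size, l, r pointers
structure PvQueue where
  capacity : Int
  size : Int
  ql : Int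
  qr : Int
  buf : List Int
deriving Repr, DecidableEq

def qFront (q : PvQueue) : Int := PySem.List.pyGetD q.buf q.ql 0      -- self.buf[self.l]
def qBack (q : PvQueue) : Int := PySem.List.pyGetD q.buf (q.qr - 1) 0 -- self.buf[self.r - 1] (Python wraps -1)
-- push_back: buf[self.r] = item (store at a 0 ≤ r < len index: List.set is exact there)
def qPushBack (q : PvQueue) (item : Int) : PvQueue :=
  { q with buf := q.buf.set q.qr.toNat item,
           qr := PySem.Int.mod (q.qr + 1) q.capacity,
           size := q.size + 1 }
def qPopBack (q : PvQueue) : PvQueue :=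
  { q with qr := if q.qr ≠ 0 then q.qr - 1 else q.capacity - 1, size := q.size - 1 }
def qPopFront (q : PvQueue) : PvQueue :=
  { q with ql := PySem.Int.mod (q.ql + 1) q.capacity, size := q.size - 1 }

-- while diff_queue and diff_queue.back() < r_diff: diff_queue.pop_back()
-- (size is a nonnegative count; Python's truthiness test 'diff_queue' is size ≠ 0, written 0 < size for termination)
def popBacks (v : Int) (q : PvQueue) : PvQueue :=
  if h : 0 < q.size ∧ qBack q < v then popBacks v (qPopBack q) else q
termination_by q.size.toNat
decreasing_by simp [qPopBack]; omega

-- while r < n and sum_w < H: …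
def advanceA (arr : List (Int × Int)) (n H l : Int) (r sw : Int) (q : PvQueue) : Int × Int × PvQueue :=
  if h : r < n ∧ sw < H then
    let sw' := sw + (PySem.List.pyGetD arr r (0, 0)).2
    let rd : Int := if r ≠ l then (PySem.List.pyGetD arr r (0, 0)).1 - (PySem.List.pyGetD arr (r - 1) (0, 0)).1 else 0
    advanceA arr n H l (r + 1) sw' (qPushBack (popBacks rd q) rd)
  else (r, sw, q)
termination_by (n - r).toNat
decreasing_by omega

-- for l in range(n): … (with the break at r == n)
def loopA (arr : List (Int × Int)) (n H : Int) : List Int → Int → Int → Int → PvQueue → Int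
  | [], _, _, ans, _ => ans
  | l :: ls, r, sw, ans, q =>
    if r = n then ans else
      let s := advanceA arr n H l r sw q
      let ans' := if H ≤ s.2.1 ∧ s.2.2.size ≠ 0 then min ans (qFront s.2.2) else ans
      let q'' := if l + 1 < n then
          (if s.2.2.size ≠ 0 ∧ (PySem.List.pyGetD arr (l + 1) (0, 0)).1 - (PySem.List.pyGetD arr l (0, 0)).1 = qFront s.2.2
           then qPopFront s.2.2 else s.2.2)
        else s.2.2
      loopA arr n H ls s.1 (s.2.1 - (PySem.List.pyGetD arr l (0, 0)).2) ans' q''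

def chairs (n : Int) (H : Int) (heights : List Int) (wides : List Int) : Int :=
  loopA (mkChairs n heights wides) n H (PySem.List.pyRange 0 n 1) 0 0 (10 ^ 9)
    ⟨n, 0, 0, 0, List.replicate n.toNat 0⟩

-- ===== PORT B =====
-- while r < n and sum_w < H: …  (appends the pushed gap to the immutable log)
def advanceB (arr : List (Int × Int)) (n H l : Int) (r sw : Int) (vals : List Int) : Int × Int × List Int :=
  if h : r < n ∧ sw < H then
    let sw' := sw + (PySem.List.pyGetD arr r (0, 0)).2
    let rd : Int := if r ≠ l then (PySem.List.pyGetD arr r (0, 0)).1 - (PySem.List.pyGetD arr (r - 1) (0, 0)).1 else 0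
    advanceB arr n H l (r + 1) sw' (vals ++ [rd])
  else (r, sw, vals)
termination_by (n - r).toNat
decreasing_by omega

-- max(vals[p:r]) — call sites guarantee p < r, so the slice is nonempty
def sliceMax (vals : List Int) (p r : Int) : Int :=
  (PySem.List.max? (PySem.List.slice vals (some p) (some r)) (fun y => y)).getD 0

def loopB (arr : List (Int × Int)) (n H : Int) : List Int → Int → Int → Int → Int → List Int → Int
  | [], _, _, _, ans, _ => ans
  | l :: ls, p, r, sw, ans, vals =>
    if r = n then ans else
      let s := advanceB arr n H l r sw vals
      let ans' := if H ≤ s.2.1 ∧ p < s.1 then min ans (sliceMax s.2.2 p s.1) else ans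
      let p' := if l + 1 < n ∧ p < s.1 ∧
                   (PySem.List.pyGetD arr (l + 1) (0, 0)).1 - (PySem.List.pyGetD arr l (0, 0)).1 = sliceMax s.2.2 p s.1
                then p + ((PySem.List.index? (PySem.List.slice s.2.2 (some p) none) (sliceMax s.2.2 p s.1)).getD 0 : Int) + 1
                else p
      loopB arr n H ls p' s.1 (s.2.1 - (PySem.List.pyGetD arr l (0, 0)).2) ans' s.2.2

def chairs_alt (n : Int) (H : Int) (heights : List Int) (wides : List Int) : Int :=
  loopB (mkChairs n heights wides) n H (PySem.List.pyRange 0 n 1) 0 0 0 (10 ^ 9) []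

-- ===== PRECONDITION & SPEC =====
-- Pre_ excludes exactly the inputs where A raises IndexError (heights[i] / wides[i] for i < n needs both lists of length ≥ n)
def Pre_chairs (n : Int) (H : Int) (heights : List Int) (wides : List Int) : Prop :=
  n ≤ (heights.length : Int) ∧ n ≤ (wides.length : Int)
instance (n : Int) (H : Int) (heights : List Int) (wides : List Int) : Decidable (Pre_chairs n H heights wides) := by unfold Pre_chairs; infer_instance

def pvWitness_chairs : Int × Int × List Int × List Int := (3, 3, [4, 1, 2], [2, 2, 1])

def Spec_chairs (n : Int) (H : Int) (heights : List Int) (wides : List Int) (out : Int) : Prop := out = chairs_alt n H heights wides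
instance (n : Int) (H : Int) (heights : List Int) (wides : List Int) (out : Int) : Decidable (Spec_chairs n H heights wides out) := by unfold Spec_chairs; infer_instance

-- ===== CLAIM (what is proved, stated in full; the proofs are below) =====
def Claim_equal_chairs : Prop := ∀ (n : Int) (H : Int) (heights : List Int) (wides : List Int), Dom_chairs n H heights wides → Pre_chairs n H heights wides → Spec_chairs n H heights wides (chairs n H heights wides)

-- ===== LEMMAS AND PROOFS =====

-- logical content of the ring buffer, front to back
def qList (q : PvQueue) : List Int :=
  (List.range q.size.toNat).map
    (fun i : Nat => PySem.List.pyGetD q.buf (PySem.Int.mod (q.ql + (i : Int)) q.capacity) 0)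

-- well-formedness of the ring buffer
def QWF (n : Int) (q : PvQueue) : Prop :=
  q.capacity = n ∧ q.buf.length = n.toNat ∧ 0 ≤ q.size ∧ q.size ≤ n ∧
  0 ≤ q.ql ∧ q.ql < n ∧ q.qr = PySem.Int.mod (q.ql + q.size) n

-- suffix maxima (with ties): the values A's monotonic queue holds for a given pushed-value list
def smt : List Int → List Int
  | [] => []
  | x :: xs => if xs.all (fun y => decide (y ≤ x)) then x :: smt xs else smt xs

def maxOf : List Int → Int
  | [] => 0
  | x :: t => t.foldl max x

-- the coupling invariant between A's queue and B's (vals, p)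
def REL (n : Int) (vals : List Int) (p : Int) (q : PvQueue) : Prop :=
  QWF n q ∧ 0 ≤ p ∧ p.toNat ≤ vals.length ∧ qList q = smt (vals.drop p.toNat)

lemma emod_small {a n : Int} (h0 : 0 ≤ a) (h1 : a < n) : a % n = a :=
  Int.emod_eq_of_lt h0 h1

lemma emod_window {a n : Int} (h0 : 0 ≤ a) (h2 : a < 2 * n) : a % n = if a < n then a else a - n := by
  split
  · exact Int.emod_eq_of_lt h0 (by omega)
  · rw [← Int.sub_emod_right a n]
    exact Int.emod_eq_of_lt (by omega) (by omega)

lemma rdropWhile_cons_neg (p : Int → Bool) (x : Int) (l : List Int) (h : p x = false) :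
    List.rdropWhile p (x :: l) = x :: List.rdropWhile p l := by
  rw [List.rdropWhile, List.rdropWhile, List.reverse_cons, List.dropWhile_append]
  split
  · rename_i he
    simp only [List.isEmpty_iff] at he
    simp [List.dropWhile, h, he]
  · simp

lemma index?_eq_some_of_mem {l : List Int} {v : Int} (h : v ∈ l) :
    PySem.List.index? l v = some (l.idxOf v) := by
  rw [PySem.List.index?_eq_idxOf?]
  induction l with
  | nil => cases h
  | cons x t ih =>
    by_cases hx : x = v
    · subst hx; simp [List.idxOf?_cons, List.idxOf_cons_self]
    · have hv : v ∈ t := by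
        rcases List.mem_cons.mp h with hh | hh
        · exact absurd hh.symm hx
        · exact hh
      simp [List.idxOf?_cons, hx, ih hv, List.idxOf_cons_ne _ hx]

lemma smt_length_le (xs : List Int) : (smt xs).length ≤ xs.length := by
  induction xs with
  | nil => simp [smt]
  | cons x t ih =>
    rw [smt]
    split
    · simpa using ih
    · simp only [List.length_cons]
      omega

lemma smt_eq_nil_iff (xs : List Int) : smt xs = [] ↔ xs = [] := by
  induction xs with
  | nil => simp [smt]
  | cons x t ih =>
    rw [smt]
    split
    · simp
    · rename_i hall
      simp only [List.all_eq_true, decide_eq_true_eq] at hall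
      push_neg at hall
      rcases hall with ⟨y, hy, _⟩
      simp only [ih]
      constructor
      · intro ht; subst ht; cases hy
      · intro h; cases h

lemma mem_of_mem_smt {y : Int} {xs : List Int} (h : y ∈ smt xs) : y ∈ xs := by
  induction xs with
  | nil => simpa [smt] using h
  | cons x t ih =>
    rw [smt] at h
    split at h
    · rcases List.mem_cons.mp h with hh | hh
      · simp [hh]
      · exact List.mem_cons_of_mem _ (ih hh)
    · exact List.mem_cons_of_mem _ (ih h)

lemma foldl_max_cons (x z : Int) (t : List Int) :
    List.foldl max x (z :: t) = max x (List.foldl max z t) := by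
  induction t generalizing x z with
  | nil => simp
  | cons w tt ih =>
    simp only [List.foldl_cons]
    have h1 := ih (max x z) w
    have h2 := ih z w
    simp only [List.foldl_cons] at h1 h2
    rw [h1, h2, max_assoc]

lemma le_maxOf_of_mem {y : Int} {xs : List Int} (h : y ∈ xs) : y ≤ maxOf xs := by
  cases xs with
  | nil => cases h
  | cons x t =>
    rw [maxOf]
    rcases List.mem_cons.mp h with hh | hh
    · subst hh
      exact (PySem.List.le_foldl_max t y).1
    · exact (PySem.List.le_foldl_max t x).2 y hh

lemma maxOf_mem {xs : List Int} (h : xs ≠ []) : maxOf xs ∈ xs := by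
  cases xs with
  | nil => exact absurd rfl h
  | cons x t =>
    rw [maxOf]
    rcases PySem.List.foldl_max_mem t x with hh | hh
    · rw [hh]; exact List.mem_cons_self
    · exact List.mem_cons_of_mem _ hh

lemma maxOf_cons_of_all {x : Int} {xs : List Int} (h : xs.all (fun y => decide (y ≤ x))) :
    maxOf (x :: xs) = x := by
  simp only [List.all_eq_true, decide_eq_true_eq] at h
  have h1 : maxOf (x :: xs) ∈ x :: xs := maxOf_mem (by simp)
  have h2 : x ≤ maxOf (x :: xs) := le_maxOf_of_mem List.mem_cons_self
  rcases List.mem_cons.mp h1 with hh | hh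
  · exact hh
  · exact le_antisymm (h _ hh) h2

lemma maxOf_cons_of_lt {x : Int} {xs : List Int} (h : ¬ xs.all (fun y => decide (y ≤ x))) :
    maxOf (x :: xs) = maxOf xs ∧ x < maxOf xs := by
  simp only [List.all_eq_true, decide_eq_true_eq] at h
  push_neg at h
  rcases h with ⟨y, hy, hxy⟩
  have hlt : x < maxOf xs := lt_of_lt_of_le hxy (le_maxOf_of_mem hy)
  refine ⟨?_, hlt⟩
  cases xs with
  | nil => cases hy
  | cons z t =>
    rw [maxOf, maxOf, foldl_max_cons]
    rw [maxOf] at hlt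
    omega

lemma smt_head {xs : List Int} (h : xs ≠ []) : (smt xs).head? = some (maxOf xs) := by
  induction xs with
  | nil => exact absurd rfl h
  | cons x t ih =>
    rw [smt]
    split
    · rename_i hall
      rw [List.head?_cons, maxOf_cons_of_all hall]
    · rename_i hall
      have ht : t ≠ [] := by
        simp only [List.all_eq_true, decide_eq_true_eq] at hall
        push_neg at hall
        rcases hall with ⟨y, hy, _⟩
        intro hnil; subst hnil; cases hy
      rw [ih ht, (maxOf_cons_of_lt hall).1]

lemma smt_append (xs : List Int) (v : Int) :
    smt (xs ++ [v]) = (smt xs).rdropWhile (fun y => decide (y < v)) ++ [v] := by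
  induction xs with
  | nil => simp [smt]
  | cons x t ih =>
    rw [List.cons_append, smt, smt]
    by_cases hall : t.all (fun y => decide (y ≤ x))
    · by_cases hv : v ≤ x
      · have hc : (t ++ [v]).all (fun y => decide (y ≤ x)) := by
          simp only [List.all_append, List.all_cons, List.all_nil] at *
          simp [hall, hv]
        rw [if_pos hc, if_pos hall, ih, rdropWhile_cons_neg _ _ _ (by simp; omega)]
        simp
      · have hc : ¬ (t ++ [v]).all (fun y => decide (y ≤ x)) := by
          simp only [List.all_append, List.all_cons, List.all_nil, Bool.and_eq_true,
            decide_eq_true_eq]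
          intro hcon
          exact hv (by simpa using hcon.2)
        rw [if_neg hc, if_pos hall, ih]
        have hall2 : ∀ y ∈ x :: smt t, (fun y => decide (y < v)) y = true := by
          intro y hy
          simp only [decide_eq_true_eq]
          rcases List.mem_cons.mp hy with hh | hh
          · omega
          · have hmem := mem_of_mem_smt hh
            simp only [List.all_eq_true, decide_eq_true_eq] at hall
            have := hall _ hmem
            omega
        have hall3 : ∀ y ∈ smt t, (fun y => decide (y < v)) y = true := by
          intro y hy; exact hall2 y (List.mem_cons_of_mem _ hy)
        rw [List.rdropWhile_eq_nil_iff.mpr hall2, List.rdropWhile_eq_nil_iff.mpr hall3]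
    · have hc : ¬ (t ++ [v]).all (fun y => decide (y ≤ x)) := by
        simp only [List.all_append, Bool.and_eq_true]
        intro hcon
        exact hall hcon.1
      rw [if_neg hc, if_neg hall, ih]

lemma smt_tail {xs : List Int} (h : xs ≠ []) :
    (smt xs).tail = smt (xs.drop (xs.idxOf (maxOf xs) + 1)) := by
  induction xs with
  | nil => exact absurd rfl h
  | cons x t ih =>
    rw [smt]
    by_cases hall : t.all (fun y => decide (y ≤ x))
    · rw [if_pos hall, maxOf_cons_of_all hall, List.idxOf_cons_self]
      simp
    · rw [if_neg hall, (maxOf_cons_of_lt hall).1]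
      have hne : x ≠ maxOf t := by
        have h2 := (maxOf_cons_of_lt hall).2
        omega
      rw [List.idxOf_cons_ne _ hne, List.drop_succ_cons]
      have ht : t ≠ [] := by
        simp only [List.all_eq_true, decide_eq_true_eq] at hall
        push_neg at hall
        rcases hall with ⟨y, hy, _⟩
        intro hnil; subst hnil; cases hy
      exact ih ht

lemma qList_length (q : PvQueue) : (qList q).length = q.size.toNat := by
  simp [qList]

lemma getLastD_eq_getLast {l : List Int} (h : l ≠ []) : l.getLastD 0 = l.getLast h := by
  rw [List.getLastD_eq_getLast?, List.getLast?_eq_getLast]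
  rfl

lemma qFront_eq {n : Int} {q : PvQueue} (hwf : QWF n q) (hs : 0 < q.size) :
    qFront q = (qList q).headD 0 := by
  obtain ⟨hcap, hlen, hsz0, hszn, hql0, hqln, hqr⟩ := hwf
  have hn : 0 < n := by omega
  have hst : q.size.toNat = (q.size.toNat - 1) + 1 := by omega
  rw [qFront, qList, hst, List.range_succ_eq_map]
  simp only [List.map_cons, List.headD_cons, Nat.cast_zero, add_zero, hcap]
  rw [PySem.Int.mod_eq_emod_of_pos hn, emod_small hql0 hqln]

lemma qBack_eq {n : Int} {q : PvQueue} (hwf : QWF n q) (hs : 0 < q.size) :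
    qBack q = (qList q).getLastD 0 := by
  obtain ⟨hcap, hlen, hsz0, hszn, hql0, hqln, hqr⟩ := hwf
  have hn : 0 < n := by omega
  have hst : q.size.toNat = (q.size.toNat - 1) + 1 := by omega
  rw [qBack, qList, hst, List.range_succ, List.map_append]
  simp only [List.map_cons, List.map_nil, List.getLastD_concat, hcap, hqr]
  have hc1 : (↑(q.size.toNat - 1) : Int) = q.size - 1 := by omega
  rw [hc1, PySem.Int.mod_eq_emod_of_pos hn, PySem.Int.mod_eq_emod_of_pos hn]
  rw [emod_window (by omega : (0:Int) ≤ q.ql + q.size) (by omega),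
    emod_window (by omega : (0:Int) ≤ q.ql + (q.size - 1)) (by omega)]
  by_cases hA : q.ql + q.size < n
  · rw [if_pos hA, if_pos (by omega)]
    have he : q.ql + q.size - 1 = q.ql + (q.size - 1) := by ring
    rw [he]
  · rw [if_neg hA]
    by_cases hB : q.ql + (q.size - 1) < n
    · have hz : q.ql + q.size - n - 1 = -1 := by omega
      have hnil : q.buf ≠ [] := by
        intro hcon
        rw [hcon] at hlen
        simp at hlen
        omega
      rw [if_pos hB, hz, PySem.List.pyGetD_neg_one q.buf 0 hnil,
        PySem.List.pyGetD_eq_getElem q.buf 0 (by omega) (by rw [hlen]; omega),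
        List.getLast_eq_getElem]
      congr 1
      omega
    · rw [if_neg hB]
      have he : q.ql + q.size - n - 1 = q.ql + (q.size - 1) - n := by ring
      rw [he]

lemma emod_add_shift {t c n : Int} (hn : 0 < n) : (t % n + c) % n = (t + c) % n := by
  conv_rhs => rw [Int.add_emod]
  rw [Int.add_emod (t % n) c n, Int.emod_emod_of_dvd _ dvd_rfl]

lemma qPushBack_spec {n : Int} {q : PvQueue} (hwf : QWF n q) (hs : q.size < n) (v : Int) :
    QWF n (qPushBack q v) ∧ qList (qPushBack q v) = qList q ++ [v] := by
  obtain ⟨hcap, hlen, hsz0, hszn, hql0, hqln, hqr⟩ := hwf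
  have hn : 0 < n := by omega
  have hqr0 : 0 ≤ q.qr := by
    rw [hqr, PySem.Int.mod_eq_emod_of_pos hn]
    exact Int.emod_nonneg _ (by omega)
  have hqrn : q.qr < n := by
    rw [hqr, PySem.Int.mod_eq_emod_of_pos hn]
    exact Int.emod_lt_of_pos _ hn
  constructor
  · refine ⟨hcap, ?_, by simp [qPushBack]; omega, by simp [qPushBack]; omega,
      by simp [qPushBack]; omega, by simp [qPushBack]; omega, ?_⟩
    · simp [qPushBack, List.length_set, hlen]
    · simp only [qPushBack, hcap, hqr]
      rw [PySem.Int.mod_eq_emod_of_pos hn, PySem.Int.mod_eq_emod_of_pos hn,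
        PySem.Int.mod_eq_emod_of_pos hn, emod_add_shift hn]
      congr 1
      ring
  · rw [qList, qList]
    simp only [qPushBack]
    have hst : (q.size + 1).toNat = q.size.toNat + 1 := by omega
    rw [hst, List.range_succ, List.map_append, hcap]
    congr 1
    · apply List.map_congr_left
      intro i hi
      simp only [List.mem_range] at hi
      have hii : (↑i : Int) < q.size := by omega
      have hi0 : (0:Int) ≤ ↑i := by omega
      have hidx0 : 0 ≤ (q.ql + ↑i) % n := Int.emod_nonneg _ (by omega)
      have hidxn : (q.ql + ↑i) % n < n := Int.emod_lt_of_pos _ hn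
      have hne : (q.ql + (↑i : Int)) % n ≠ q.qr := by
        rw [hqr, PySem.Int.mod_eq_emod_of_pos hn]
        rw [emod_window (by omega) (by omega), emod_window (by omega) (by omega)]
        split <;> split <;> omega
      have hneNat : q.qr.toNat ≠ ((q.ql + (↑i : Int)) % n).toNat := by omega
      rw [PySem.Int.mod_eq_emod_of_pos hn,
        PySem.List.pyGetD_eq_getElem _ 0 hidx0 (by rw [List.length_set, hlen]; omega),
        PySem.List.pyGetD_eq_getElem _ 0 hidx0 (by rw [hlen]; omega),
        List.getElem_set_ne hneNat]
    · simp only [List.map_cons, List.map_nil]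
      have hc : (↑q.size.toNat : Int) = q.size := by omega
      rw [hc, ← hqr]
      rw [PySem.List.pyGetD_eq_getElem _ 0 hqr0 (by rw [List.length_set, hlen]; omega)]
      rw [List.getElem_set_self]

lemma qPopBack_spec {n : Int} {q : PvQueue} (hwf : QWF n q) (hs : 0 < q.size) :
    QWF n (qPopBack q) ∧ qList (qPopBack q) = (qList q).dropLast := by
  obtain ⟨hcap, hlen, hsz0, hszn, hql0, hqln, hqr⟩ := hwf
  have hn : 0 < n := by omega
  constructor
  · refine ⟨hcap, hlen, by simp [qPopBack]; omega, by simp [qPopBack]; omega,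
      hql0, hqln, ?_⟩
    simp only [qPopBack, hcap, hqr]
    rw [PySem.Int.mod_eq_emod_of_pos hn, PySem.Int.mod_eq_emod_of_pos hn]
    rw [emod_window (by omega : (0:Int) ≤ q.ql + q.size) (by omega),
      emod_window (by omega : (0:Int) ≤ q.ql + (q.size - 1)) (by omega)]
    split <;> split <;> split_ifs <;> omega
  · rw [qList, qList]
    simp only [qPopBack]
    have hst : q.size.toNat = (q.size - 1).toNat + 1 := by omega
    rw [hst, List.range_succ, List.map_append]
    simp only [List.map_cons, List.map_nil]
    rw [List.dropLast_concat]

lemma qPopFront_spec {n : Int} {q : PvQueue} (hwf : QWF n q) (hs : 0 < q.size) :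
    QWF n (qPopFront q) ∧ qList (qPopFront q) = (qList q).tail := by
  obtain ⟨hcap, hlen, hsz0, hszn, hql0, hqln, hqr⟩ := hwf
  have hn : 0 < n := by omega
  constructor
  · refine ⟨hcap, hlen, by simp [qPopFront]; omega, by simp [qPopFront]; omega, ?_, ?_, ?_⟩
    · simp only [qPopFront, hcap]
      rw [PySem.Int.mod_eq_emod_of_pos hn]
      exact Int.emod_nonneg _ (by omega)
    · simp only [qPopFront, hcap]
      rw [PySem.Int.mod_eq_emod_of_pos hn]
      exact Int.emod_lt_of_pos _ hn
    · simp only [qPopFront, hcap, hqr]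
      rw [PySem.Int.mod_eq_emod_of_pos hn, PySem.Int.mod_eq_emod_of_pos hn,
        PySem.Int.mod_eq_emod_of_pos hn, emod_add_shift hn]
      congr 1
      ring
  · rw [qList, qList]
    simp only [qPopFront]
    have hst : q.size.toNat = ((q.size - 1).toNat) + 1 := by omega
    rw [hst, List.range_succ_eq_map]
    simp only [List.map_cons, List.tail_cons, List.map_map]
    apply List.map_congr_left
    intro i hi
    simp only [Function.comp_apply, hcap]
    simp only [PySem.Int.mod_eq_emod_of_pos hn]
    rw [emod_add_shift hn]
    congr 1
    push_cast
    ring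

lemma popBacks_spec {n : Int} (v : Int) {q : PvQueue} (hwf : QWF n q) :
    QWF n (popBacks v q) ∧ qList (popBacks v q) =
      (qList q).rdropWhile (fun y => decide (y < v)) ∧ (popBacks v q).size ≤ q.size := by
  revert hwf
  induction q using popBacks.induct v with
  | case1 q h ih =>
    intro hwf
    obtain ⟨hs, hb⟩ := h
    obtain ⟨hwf2, hlist⟩ := qPopBack_spec hwf hs
    have hnil : qList q ≠ [] := by
      intro hcon
      have hl := qList_length q
      rw [hcon] at hl
      simp at hl
      omega
    obtain ⟨ih1, ih2, ih3⟩ := ih hwf2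
    rw [popBacks, dif_pos ⟨hs, hb⟩]
    have hlast : (qList q).getLast hnil = qBack q := by
      rw [qBack_eq hwf hs, getLastD_eq_getLast hnil]
    have hpb : (qPopBack q).size = q.size - 1 := rfl
    refine ⟨ih1, ?_, by omega⟩
    rw [ih2, hlist]
    have hstep := List.rdropWhile_concat_pos (fun y => decide (y < v))
      ((qList q).dropLast) ((qList q).getLast hnil)
      (by simp only [decide_eq_true_eq]; rw [hlast]; exact hb)
    calc List.rdropWhile (fun y => decide (y < v)) (qList q).dropLast
        = List.rdropWhile (fun y => decide (y < v))
            ((qList q).dropLast ++ [(qList q).getLast hnil]) := hstep.symm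
      _ = List.rdropWhile (fun y => decide (y < v)) (qList q) := by
            rw [List.dropLast_append_getLast hnil]
  | case2 q h =>
    intro hwf
    rw [popBacks, dif_neg h]
    refine ⟨hwf, ?_, le_refl _⟩
    by_cases hs : 0 < q.size
    · have hb : ¬ qBack q < v := fun hcon => h ⟨hs, hcon⟩
      have hnil : qList q ≠ [] := by
        intro hcon
        have hl := qList_length q
        rw [hcon] at hl
        simp at hl
        omega
      have hlast : (qList q).getLast hnil = qBack q := by
        rw [qBack_eq hwf hs, getLastD_eq_getLast hnil]
      have hstep := List.rdropWhile_concat_neg (fun y => decide (y < v))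
        ((qList q).dropLast) ((qList q).getLast hnil)
        (by simp only [decide_eq_true_eq]; rw [hlast]; exact hb)
      have hcalc : List.rdropWhile (fun y => decide (y < v)) (qList q) = qList q := by
        conv_lhs => rw [← List.dropLast_append_getLast hnil]
        rw [hstep]
        exact List.dropLast_append_getLast hnil
      exact hcalc.symm
    · have hqnil : qList q = [] := by
        have hl := qList_length q
        obtain ⟨hcap, hlen, hsz0, _⟩ := hwf
        have hz : q.size.toNat = 0 := by omega
        rw [hz] at hl
        exact List.length_eq_zero_iff.mp hl
      rw [hqnil, List.rdropWhile_nil]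

-- the two inner while-loops-- the two inner while-loops advance in lockstep
lemma advance_rel (arr : List (Int × Int)) (n H l : Int) :
    ∀ (k : Nat) (r sw : Int) (q : PvQueue) (vals : List Int) (p : Int),
      (n - r).toNat = k → REL n vals p q → (vals.length : Int) = r →
      (advanceA arr n H l r sw q).1 = (advanceB arr n H l r sw vals).1 ∧
      (advanceA arr n H l r sw q).2.1 = (advanceB arr n H l r sw vals).2.1 ∧
      REL n (advanceB arr n H l r sw vals).2.2 p (advanceA arr n H l r sw q).2.2 ∧
      (((advanceB arr n H l r sw vals).2.2).length : Int) = (advanceA arr n H l r sw q).1 := by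
  intro k
  induction k with
  | zero =>
    intro r sw q vals p hk hrel hlen
    have hge : ¬ (r < n ∧ sw < H) := by
      intro ⟨h1, _⟩
      omega
    rw [advanceA, dif_neg hge, advanceB, dif_neg hge]
    exact ⟨rfl, rfl, hrel, hlen⟩
  | succ k IH =>
    intro r sw q vals p hk hrel hlen
    by_cases hc : r < n ∧ sw < H
    · rw [advanceA, dif_pos hc, advanceB, dif_pos hc]
      obtain ⟨hwf, hp0, hpl, hqlist⟩ := hrel
      -- the pushed gap value (identical expression in both programs)
      set rd : Int := if r ≠ l then (PySem.List.pyGetD arr r (0, 0)).1 - (PySem.List.pyGetD arr (r - 1) (0, 0)).1 else 0 with hrd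
      obtain ⟨hwf1, hqlist1, hsz1⟩ := popBacks_spec rd hwf
      have hr0 : 0 ≤ r := by
        rw [← hlen]
        omega
      have hszlt : (popBacks rd q).size < n := by
        have h1 := qList_length (popBacks rd q)
        have h2 : (qList (popBacks rd q)).length ≤ (qList q).length := by
          rw [hqlist1, List.rdropWhile]
          simpa using List.length_dropWhile_le _ (qList q).reverse
        have h3 := qList_length q
        have h4 : (qList q).length ≤ (vals.drop p.toNat).length := by
          rw [hqlist]
          exact smt_length_le _
        have h5 : (vals.drop p.toNat).length ≤ vals.length := by
          simp
        obtain ⟨hc1, hc2, hs0, hc4⟩ := hwf1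
        omega
      obtain ⟨hwf2, hqlist2⟩ := qPushBack_spec hwf1 hszlt rd
      have hrel2 : REL n (vals ++ [rd]) p (qPushBack (popBacks rd q) rd) := by
        refine ⟨hwf2, hp0, by simp; omega, ?_⟩
        rw [hqlist2, hqlist1, hqlist,
          List.drop_append_of_le_length hpl, smt_append]
      exact IH (r + 1) (sw + (PySem.List.pyGetD arr r (0, 0)).2)
        (qPushBack (popBacks rd q) rd) (vals ++ [rd]) p (by omega) hrel2
        (by simp; omega)
    · rw [advanceA, dif_neg hc, advanceB, dif_neg hc]
      exact ⟨rfl, rfl, hrel, hlen⟩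

-- the two outer loops agree
lemma loop_rel (arr : List (Int × Int)) (n H : Int) :
    ∀ (ls : List Int) (r sw ans : Int) (q : PvQueue) (vals : List Int) (p : Int),
      REL n vals p q → (vals.length : Int) = r →
      loopA arr n H ls r sw ans q = loopB arr n H ls p r sw ans vals := by
  intro ls
  induction ls with
  | nil =>
    intro r sw ans q vals p hrel hlen
    rfl
  | cons l ls IH =>
    intro r sw ans q vals p hrel hlen
    rw [loopA, loopB]
    by_cases hrn : r = n
    · rw [if_pos hrn, if_pos hrn]
    · rw [if_neg hrn, if_neg hrn]
      have hp0 : 0 ≤ p := hrel.2.1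
      obtain ⟨her, hesw, hrel2, hlen2⟩ :=
        advance_rel arr n H l ((n - r).toNat) r sw q vals p rfl hrel hlen
      obtain ⟨hwf2, hp0', hpl2, hqlist2⟩ := hrel2
      set sA := advanceA arr n H l r sw q with hsA
      set sB := advanceB arr n H l r sw vals with hsB
      set ss : List Int := sB.2.2.drop p.toNat with hss
      have hsz0 : 0 ≤ sA.2.2.size := hwf2.2.2.1
      have hlsz := qList_length sA.2.2
      have hsize_iff : sA.2.2.size ≠ 0 ↔ p < sB.1 := by
        constructor
        · intro hne
          by_contra hpr
          have hdrop : ss = [] := by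
            rw [hss, List.drop_eq_nil_iff]
            omega
          rw [hqlist2, hdrop] at hlsz
          simp [smt] at hlsz
          omega
        · intro hpr hcon
          have hnss : ss ≠ [] := by
            rw [hss]
            intro hcon2
            rw [List.drop_eq_nil_iff] at hcon2
            omega
          rw [hqlist2, hcon] at hlsz
          simp at hlsz
          exact hnss ((smt_eq_nil_iff ss).mp hlsz)
      have hslice : PySem.List.slice sB.2.2 (some p) (some sB.1) = ss := by
        rw [PySem.List.slice_toNat _ hp0 (by omega : (0:Int) ≤ sB.1), hss]
        apply List.take_of_length_le
        simp
        omega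
      have hmax : p < sB.1 → sliceMax sB.2.2 p sB.1 = maxOf ss := by
        intro hpr
        have hnss : ss ≠ [] := by
          rw [hss]
          intro hcon
          rw [List.drop_eq_nil_iff] at hcon
          omega
        obtain ⟨x, t, hxt⟩ := List.exists_cons_of_ne_nil hnss
        rw [sliceMax, hslice, hxt, PySem.List.max?_id_cons]
        rfl
      have hfront : p < sB.1 → qFront sA.2.2 = sliceMax sB.2.2 p sB.1 := by
        intro hpr
        have hnss : ss ≠ [] := by
          rw [hss]
          intro hcon
          rw [List.drop_eq_nil_iff] at hcon
          omega
        have hsp : 0 < sA.2.2.size := by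
          have := hsize_iff.mpr hpr
          omega
        rw [qFront_eq hwf2 hsp, List.headD_eq_head?_getD, hqlist2, smt_head hnss,
          hmax hpr]
        rfl
      have hans : (if H ≤ sA.2.1 ∧ sA.2.2.size ≠ 0 then min ans (qFront sA.2.2) else ans) =
          (if H ≤ sB.2.1 ∧ p < sB.1 then min ans (sliceMax sB.2.2 p sB.1) else ans) := by
        by_cases hcnd : H ≤ sB.2.1 ∧ p < sB.1
        · rw [if_pos hcnd, if_pos (by rw [hesw]; exact ⟨hcnd.1, hsize_iff.mpr hcnd.2⟩),
            hfront hcnd.2]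
        · rw [if_neg hcnd,
            if_neg (by rw [hesw]; intro ⟨h1, h2⟩; exact hcnd ⟨h1, hsize_iff.mp h2⟩)]
      simp only []
      rw [hans]
      set ld : Int := (PySem.List.pyGetD arr (l + 1) (0, 0)).1 -
        (PySem.List.pyGetD arr l (0, 0)).1 with hld
      by_cases hcnd2 : l + 1 < n ∧ p < sB.1 ∧ ld = sliceMax sB.2.2 p sB.1
      · obtain ⟨hb1, hb2, hb3⟩ := hcnd2
        have hnss : ss ≠ [] := by
          rw [hss]
          intro hcon
          rw [List.drop_eq_nil_iff] at hcon
          omega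
        have hsp : 0 < sA.2.2.size := by
          have := hsize_iff.mpr hb2
          omega
        obtain ⟨hwf3, hqlist3⟩ := qPopFront_spec hwf2 hsp
        have hmem : maxOf ss ∈ ss := maxOf_mem hnss
        have hidx : PySem.List.index? (PySem.List.slice sB.2.2 (some p) none)
            (sliceMax sB.2.2 p sB.1) = some (ss.idxOf (maxOf ss)) := by
          rw [PySem.List.slice_from _ hp0, ← hss, hmax hb2]
          exact index?_eq_some_of_mem hmem
        have hidxlt : ss.idxOf (maxOf ss) < ss.length := List.idxOf_lt_length_of_mem hmem
        have hsslen : ss.length = sB.2.2.length - p.toNat := by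
          rw [hss]
          simp
        have hrel3 : REL n sB.2.2 (p + (↑(ss.idxOf (maxOf ss)) : Int) + 1)
            (qPopFront sA.2.2) := by
          refine ⟨hwf3, by omega, by omega, ?_⟩
          rw [hqlist3, hqlist2, smt_tail hnss]
          congr 1
          rw [hss, List.drop_drop]
          congr 1
          omega
        rw [if_pos (show l + 1 < n from hb1),
          if_pos (show sA.2.2.size ≠ 0 ∧ ld = qFront sA.2.2 from
            ⟨hsize_iff.mpr hb2, by rw [hfront hb2]; exact hb3⟩),
          if_pos (show l + 1 < n ∧ p < sB.1 ∧ ld = sliceMax sB.2.2 p sB.1 from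
            ⟨hb1, hb2, hb3⟩)]
        rw [hidx]
        simp only [Option.getD_some]
        rw [her, hesw]
        exact IH sB.1 (sB.2.1 - (PySem.List.pyGetD arr l (0, 0)).2) _ _ sB.2.2 _ hrel3
          (by rw [hlen2, her])
      · rw [if_neg hcnd2]
        have hAno : (if l + 1 < n then
            (if sA.2.2.size ≠ 0 ∧ ld = qFront sA.2.2 then qPopFront sA.2.2 else sA.2.2)
          else sA.2.2) = sA.2.2 := by
          by_cases hb1 : l + 1 < n
          · rw [if_pos hb1, if_neg]
            intro ⟨h1, h2⟩
            have hpr : p < sB.1 := hsize_iff.mp h1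
            exact hcnd2 ⟨hb1, hpr, by rw [← hfront hpr]; exact h2⟩
          · rw [if_neg hb1]
        rw [hAno, her, hesw]
        exact IH sB.1 (sB.2.1 - (PySem.List.pyGetD arr l (0, 0)).2) _ _ sB.2.2 p
          ⟨hwf2, hp0', hpl2, hqlist2⟩ (by rw [hlen2, her])

lemma chairs_eq_alt (n H : Int) (heights wides : List Int) :
    chairs n H heights wides = chairs_alt n H heights wides := by
  rw [chairs, chairs_alt]
  by_cases hn : 0 < n
  · apply loop_rel
    · refine ⟨⟨rfl, by simp, by simp, by simp; omega, by simp, by simp; omega, ?_⟩,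
        by simp, by simp, ?_⟩
      · show (0:Int) = PySem.Int.mod (0 + 0) n
        rw [PySem.Int.mod_eq_emod_of_pos hn]
        simp
      · show qList _ = smt (List.drop (0:Int).toNat [])
        simp [qList, smt]
    · rfl
  · rw [PySem.List.pyRange_one_eq_nil (by omega)]
    rfl

theorem chairs_spec : Claim_equal_chairs := by
  intro n H heights wides _ _
  unfold Spec_chairs
  exact chairs_eq_alt n H heights wides
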